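-- pv_equiv track=rewrite | github.com/Az1tchhh/PP2_LABS | lab3/f1/8.py | oos
-- ===== SOURCE A (Python) =====
-- def oos(list):
--     cnt0=0
--     for i in range(len(list)):
--         if(list[i]==0):
--             cnt0+=1
--         if(list[i]==7):
--             if(cnt0==2):
--                 return True
--             else:
--                 cnt0=0
--     return False
-- ===== SOURCE B (Python) =====
-- def oos(list):
--     groups = []
--     cur = []
--     for x in list:
--         if x == 7:
--             groups.append(cur)
--             cur = []
--         else:
--             cur.append(x)
--     return any(g.count(0) == 2 for g in groups)
-- ===== Notes on version B (the rewrite author's own statement) =====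
-- stated objective: alternative
-- what changed: B splits the list into segments delimited by 7 in one pass and then checks whether any completed segment contains exactly two zeros, replacing A's inline zero-counter with early return and reset.
import Mathlib
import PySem

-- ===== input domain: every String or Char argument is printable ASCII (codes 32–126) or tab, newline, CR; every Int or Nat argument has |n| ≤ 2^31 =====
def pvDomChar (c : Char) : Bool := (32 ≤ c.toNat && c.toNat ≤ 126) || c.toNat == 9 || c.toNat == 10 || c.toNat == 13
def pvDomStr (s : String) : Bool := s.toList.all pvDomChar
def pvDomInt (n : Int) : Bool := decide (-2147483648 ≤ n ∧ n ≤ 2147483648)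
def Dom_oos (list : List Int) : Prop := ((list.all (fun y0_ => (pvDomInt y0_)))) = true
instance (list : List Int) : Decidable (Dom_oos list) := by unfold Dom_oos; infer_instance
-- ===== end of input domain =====

-- B is a structurally different decomposition (split into 7-delimited segments, then scan); same cost, no speed claim.

-- ===== PORT A =====
-- A's for-loop over indices with the running zero counter, as structural recursion over the list with the same state.
def oosLoop (xs : List Int) (cnt0 : Int) : Bool :=
  match xs with
  | [] => false
  | x :: rest =>
    let cnt0' := if x == 0 then cnt0 + 1 else cnt0
    if x == 7 then
      if cnt0' == 2 then true else oosLoop rest 0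
    else oosLoop rest cnt0'

def oos (list : List Int) : Bool := oosLoop list 0

-- ===== PORT B =====
-- B's first pass: build the list of segments completed by a 7 (the trailing segment is dropped).
def oosGroups (xs : List Int) (groups : List (List Int)) (cur : List Int) : List (List Int) :=
  match xs with
  | [] => groups
  | x :: rest =>
    if x == 7 then oosGroups rest (groups ++ [cur]) []
    else oosGroups rest groups (cur ++ [x])

def oos_alt (list : List Int) : Bool :=
  (oosGroups list [] []).any (fun g => PySem.List.count g 0 == 2)

-- ===== PRECONDITION & SPEC =====
def Spec_oos (list : List Int) (out : Bool) : Prop := out = oos_alt list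
instance (list : List Int) (out : Bool) : Decidable (Spec_oos list out) := by unfold Spec_oos; infer_instance

-- ===== CLAIM (what is proved, stated in full; the proofs are below) =====
def Claim_equal_oos : Prop := ∀ (list : List Int), Dom_oos list → Spec_oos list (oos list)

-- ===== LEMMAS AND PROOFS =====

theorem oosGroups_append (xs : List Int) (g1 g2 : List (List Int)) (cur : List Int) :
    oosGroups xs (g1 ++ g2) cur = g1 ++ oosGroups xs g2 cur := by
  induction xs generalizing g2 cur with
  | nil => rfl
  | cons x rest ih =>
    simp only [oosGroups]
    split_ifs with h
    · rw [List.append_assoc, ih]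
    · exact ih g2 (cur ++ [x])

theorem oosLoop_eq (xs : List Int) (cur : List Int) :
    oosLoop xs ((cur.count 0 : Nat) : Int) =
      (oosGroups xs [] cur).any (fun g => PySem.List.count g 0 == 2) := by
  induction xs generalizing cur with
  | nil => rfl
  | cons x rest ih =>
    simp only [oosLoop, oosGroups]
    by_cases h7 : x = 7
    · subst h7
      rw [if_pos (by decide : ((7:Int) == 7) = true), if_pos (by decide : ((7:Int) == 7) = true),
        if_neg (by decide : ¬ ((7:Int) == 0) = true),
        show ([] ++ [cur] : List (List Int)) = [cur] ++ [] by simp,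
        oosGroups_append, List.any_append]
      by_cases h2 : (cur.count 0 : Nat) = 2
      · simp [PySem.List.count, h2]
      · have hne : ¬ (((cur.count 0 : Nat) : Int) == 2) = true := by
          simp only [beq_iff_eq]; omega
        rw [if_neg hne]
        have h := ih ([] : List Int)
        simp only [List.count_nil, Int.ofNat_zero] at h
        rw [h]
        simp [PySem.List.count, h2]
    · simp only [if_neg (show ¬((x == 7) = true) by simpa using h7)]
      by_cases h0 : x = 0
      · subst h0
        have : ((cur.count 0 : Nat) : Int) + 1 = (((cur ++ [0]).count 0 : Nat) : Int) := by
          simp [List.count_append]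
        simp only [beq_self_eq_true, if_pos, this]
        exact ih (cur ++ [0])
      · rw [if_neg (by simpa using h0)]
        have : ((cur.count 0 : Nat) : Int) = (((cur ++ [x]).count 0 : Nat) : Int) := by
          simp [List.count_append, h0]
        rw [this]
        exact ih (cur ++ [x])

-- ===== VERDICT (by name: the statement is the Claim_ definition above) =====
theorem oos_spec : Claim_equal_oos := by
  intro list _
  show oos list = oos_alt list
  have := oosLoop_eq list []
  simpa [oos, oos_alt] using this
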